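-- pv_equiv track=rewrite | github.com/jfgoodall/advent-of-code | 2019/py/day16.py | sum_nonzero_patterned_values
-- ===== SOURCE A (Python) =====
-- def sum_nonzero_patterned_values(level, seq):
--     accum = 0
--     idx = level
--     while idx < len(seq):
--         for _ in range(level+1):
--             accum += seq[idx]
--             idx += 1
--             if idx == len(seq):
--                 break
--         idx += level + 1
--         if idx >= len(seq):
--             break
--         for _ in range(level+1):
--             accum -= seq[idx]
--             idx += 1
--             if idx == len(seq):
--                 break
--         idx += level + 1
--     return accum
-- ===== SOURCE B (Python) =====
-- def sum_nonzero_patterned_values(level, seq):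
--     n = len(seq)
--     s = 0
--     prefix = [0]
--     for x in seq:
--         s += x
--         prefix.append(s)
--     L = level + 1
--     total = 0
--     k = 0
--     while True:
--         start = level + 4 * L * k
--         if start >= n:
--             break
--         total += prefix[min(start + L, n)] - prefix[start]
--         sub = start + 2 * L
--         if sub < n:
--             total -= prefix[min(sub + L, n)] - prefix[sub]
--         k += 1
--     return total
-- ===== Notes on version B (the rewrite author's own statement) =====
-- stated objective: alternative
-- what changed: Replaces A's element-by-element add/skip/subtract/skip index scan with a prefix-sum array built in one pass plus per-block range-sum arithmetic (block starts computed in closed form from the block index k).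
import Mathlib
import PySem

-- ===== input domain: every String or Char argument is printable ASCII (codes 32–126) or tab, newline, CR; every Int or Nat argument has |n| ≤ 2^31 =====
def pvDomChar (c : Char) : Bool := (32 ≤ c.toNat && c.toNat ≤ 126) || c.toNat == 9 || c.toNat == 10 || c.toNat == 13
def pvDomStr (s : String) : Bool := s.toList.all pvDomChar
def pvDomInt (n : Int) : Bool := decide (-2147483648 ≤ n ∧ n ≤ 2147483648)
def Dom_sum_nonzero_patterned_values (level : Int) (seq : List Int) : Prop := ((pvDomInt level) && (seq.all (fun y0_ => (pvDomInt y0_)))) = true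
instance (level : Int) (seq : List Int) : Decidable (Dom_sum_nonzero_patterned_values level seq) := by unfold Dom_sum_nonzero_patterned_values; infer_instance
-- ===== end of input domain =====

-- B replaces A's element-by-element add/skip/subtract/skip scan by a prefix-sum array and
-- per-block range sums (block starts in closed form from the block index k); same O(n) cost.

-- ===== PORT A =====
-- one inner `for _ in range(level+1)` loop of A: adds sign*seq[idx], breaks when idx hits len(seq)
def pvInnerA (seq : List Int) (sign : Int) : Nat → Int → Int → Int × Int
  | 0, accum, idx => (accum, idx)
  | m+1, accum, idx =>
    let accum := accum + sign * PySem.List.pyGetD seq idx 0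
    let idx := idx + 1
    if idx = (seq.length : Int) then (accum, idx)
    else pvInnerA seq sign m accum idx

-- A's `while idx < len(seq)` loop; fuel = len(seq)+1 iterations suffices for level ≥ 0 (Pre_)
def pvLoopA (seq : List Int) (level : Int) : Nat → Int → Int → Int
  | 0, accum, _ => accum
  | fuel+1, accum, idx =>
    if idx < (seq.length : Int) then
      let r1 := pvInnerA seq 1 (level+1).toNat accum idx
      let i2 := r1.2 + (level + 1)
      if (seq.length : Int) ≤ i2 then r1.1
      else
        let r2 := pvInnerA seq (-1) (level+1).toNat r1.1 i2
        pvLoopA seq level fuel r2.1 (r2.2 + (level + 1))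
    else accum

def sum_nonzero_patterned_values (level : Int) (seq : List Int) : Int :=
  pvLoopA seq level (seq.length + 1) 0 level

-- ===== PORT B =====
-- one-pass prefix-sum build: running sum s, list `prefix` with prefix[j] = sum(seq[:j])
def pvPrefix (seq : List Int) : Int × List Int :=
  seq.foldl (fun sp x => (sp.1 + x, sp.2 ++ [sp.1 + x])) (0, [0])

-- B's `while True` block loop over k; fuel = len(seq)+1 iterations suffices for level ≥ 0 (Pre_)
def pvLoopB (n level L : Int) (pre : List Int) : Nat → Int → Int → Int
  | 0, total, _ => total
  | fuel+1, total, k =>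
    let start := level + 4 * L * k
    if n ≤ start then total
    else
      let total := total + (PySem.List.pyGetD pre (min (start + L) n) 0 - PySem.List.pyGetD pre start 0)
      let sub := start + 2 * L
      let total := if sub < n then total - (PySem.List.pyGetD pre (min (sub + L) n) 0 - PySem.List.pyGetD pre sub 0) else total
      pvLoopB n level L pre fuel total (k + 1)

def sum_nonzero_patterned_values_alt (level : Int) (seq : List Int) : Int :=
  let p := pvPrefix seq
  pvLoopB (seq.length : Int) level (level + 1) p.2 (seq.length + 1) 0 0

-- ===== PRECONDITION & SPEC =====
-- Pre_ excludes level < 0, on which Python A never returns (its index never reaches len(seq), so the while loop runs forever).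
def Pre_sum_nonzero_patterned_values (level : Int) (seq : List Int) : Prop := 0 ≤ level
instance (level : Int) (seq : List Int) : Decidable (Pre_sum_nonzero_patterned_values level seq) := by unfold Pre_sum_nonzero_patterned_values; infer_instance
def pvWitness_sum_nonzero_patterned_values : Int × List Int := (1, [1, 2, 3, 4, 5, 6, 7, 8])

def Spec_sum_nonzero_patterned_values (level : Int) (seq : List Int) (out : Int) : Prop := out = sum_nonzero_patterned_values_alt level seq
instance (level : Int) (seq : List Int) (out : Int) : Decidable (Spec_sum_nonzero_patterned_values level seq out) := by unfold Spec_sum_nonzero_patterned_values; infer_instance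

-- ===== CLAIM (what is proved, stated in full; the proofs are below) =====
def Claim_equal_sum_nonzero_patterned_values : Prop := ∀ (level : Int) (seq : List Int), Dom_sum_nonzero_patterned_values level seq → Pre_sum_nonzero_patterned_values level seq → Spec_sum_nonzero_patterned_values level seq (sum_nonzero_patterned_values level seq)

-- ===== LEMMAS AND PROOFS =====

-- prefix sums as a function: pvT seq j = sum(seq[:j]) for 0 ≤ j
def pvT (seq : List Int) (j : Int) : Int := (seq.take j.toNat).sum

lemma pvT_succ (seq : List Int) (i : Int) (h0 : 0 ≤ i) (h1 : i < (seq.length : Int)) :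
    pvT seq (i + 1) = pvT seq i + seq[i.toNat]'(by omega) := by
  unfold pvT
  have h2 : (i + 1).toNat = i.toNat + 1 := by omega
  have hlt : i.toNat < seq.length := by omega
  rw [h2, List.take_add_one, List.getElem?_eq_getElem hlt]
  simp only [Option.toList_some, List.sum_append, List.sum_cons, List.sum_nil, add_zero]

lemma pvPrefix_eq (seq : List Int) :
    pvPrefix seq = (seq.sum, (List.range (seq.length + 1)).map (fun j => (seq.take j).sum)) := by
  induction seq using List.reverseRecOn with
  | nil => simp [pvPrefix, List.range_succ]
  | append_singleton xs x ih =>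
    unfold pvPrefix at *
    rw [List.foldl_append, ih]
    simp only [List.foldl_cons, List.foldl_nil]
    rw [Prod.mk.injEq]
    refine ⟨by simp, ?_⟩
    symm
    have hlen : (xs ++ [x]).length + 1 = (xs.length + 1) + 1 := by simp
    rw [hlen, List.range_succ, List.map_append]
    congr 1
    · apply List.map_congr_left
      intro j hj
      have hjle : j ≤ xs.length := by have := List.mem_range.mp hj; omega
      rw [List.take_append_of_le_length hjle]
    · simp

lemma pvPget (seq : List Int) (j : Int) (h0 : 0 ≤ j) (h1 : j ≤ (seq.length : Int)) :
    PySem.List.pyGetD (pvPrefix seq).2 j 0 = pvT seq j := by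
  have hP : (pvPrefix seq).2 = (List.range (seq.length + 1)).map (fun j => (seq.take j).sum) := by
    rw [pvPrefix_eq]
  rw [hP]
  rw [PySem.List.pyGetD_eq_getElem _ 0 h0 (by simp; omega)]
  have hj : j.toNat < seq.length + 1 := by omega
  simp only [List.getElem_map, List.getElem_range]
  rfl

lemma pvInnerA_spec (seq : List Int) (sign : Int) :
    ∀ (m : Nat) (accum idx : Int), 0 ≤ idx → idx < (seq.length : Int) →
      pvInnerA seq sign m accum idx =
        (accum + sign * (pvT seq (min (idx + m) seq.length) - pvT seq idx),
         min (idx + (m : Int)) (seq.length : Int)) := by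
  intro m
  induction m with
  | zero =>
    intro accum idx h0 h1
    simp only [pvInnerA, Nat.cast_zero, add_zero]
    rw [min_eq_left (le_of_lt h1)]
    simp
  | succ m ih =>
    intro accum idx h0 h1
    simp only [pvInnerA]
    have hget : PySem.List.pyGetD seq idx 0 = seq[idx.toNat]'(by omega) := by
      rw [PySem.List.pyGetD_eq_getElem _ 0 h0 h1]
    by_cases hend : idx + 1 = (seq.length : Int)
    · rw [if_pos hend]
      have hmin : min (idx + ((m : Int) + 1)) (seq.length : Int) = (seq.length : Int) := by omega
      have : pvT seq (seq.length : Int) = pvT seq (idx + 1) := by rw [hend]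
      rw [hget]
      push_cast
      rw [hmin, this, pvT_succ seq idx h0 h1, hend]
      rw [Prod.mk.injEq]
      exact ⟨by ring, rfl⟩
    · rw [if_neg hend]
      have h1' : idx + 1 < (seq.length : Int) := by omega
      rw [ih _ (idx + 1) (by omega) h1']
      rw [hget]
      have hmin : min (idx + 1 + (m : Int)) (seq.length : Int)
          = min (idx + ((m : Int) + 1)) (seq.length : Int) := by omega
      push_cast
      rw [hmin]
      rw [Prod.mk.injEq]
      exact ⟨by rw [pvT_succ seq idx h0 h1]; ring, rfl⟩

lemma pvLoopA_done (seq : List Int) (level : Int) (fuel : Nat) (a idx : Int)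
    (h : (seq.length : Int) ≤ idx) : pvLoopA seq level fuel a idx = a := by
  cases fuel with
  | zero => rfl
  | succ fuel => rw [pvLoopA, if_neg (by omega)]

lemma pvLoopB_done (seq : List Int) (level L : Int) (fuel : Nat) (a k : Int)
    (h : (seq.length : Int) ≤ level + 4 * L * k) :
    pvLoopB (seq.length : Int) level L (pvPrefix seq).2 fuel a k = a := by
  cases fuel with
  | zero => rfl
  | succ fuel => rw [pvLoopB, if_pos (by omega)]

lemma pvLoop_eq (seq : List Int) (level : Int) (hlev : 0 ≤ level) :
    ∀ (fuel : Nat) (k accum : Int), 0 ≤ k →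
      pvLoopA seq level fuel accum (level + 4 * (level + 1) * k) =
        pvLoopB (seq.length : Int) level (level + 1) (pvPrefix seq).2 fuel accum k := by
  intro fuel
  induction fuel with
  | zero => intro k accum _; rfl
  | succ fuel ih =>
    intro k accum hk
    have hn : (0:Int) ≤ (seq.length : Int) := by positivity
    set n : Int := (seq.length : Int) with hnn
    set L : Int := level + 1 with hL
    set start : Int := level + 4 * L * k with hstart
    have hL1 : 1 ≤ L := by omega
    have hstart0 : 0 ≤ start := by
      have : 0 ≤ 4 * L * k := by positivity
      omega
    simp only [pvLoopA, pvLoopB]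
    by_cases hs : start < n
    · rw [if_pos hs, if_neg (show ¬ (n ≤ start) by omega)]
      have hLt : ((L.toNat : Int)) = L := by omega
      have hi1 := pvInnerA_spec seq 1 L.toNat accum start hstart0 hs
      rw [hLt] at hi1
      rw [hi1]
      dsimp only
      rw [pvPget seq (min (start + L) n) (by omega) (by omega),
          pvPget seq start hstart0 (by omega)]
      simp only [one_mul]
      by_cases hfull : start + L < n
      · have hmin1 : min (start + L) n = start + L := by omega
        rw [hmin1]
        by_cases hsubn : start + L + L < n
        · rw [if_neg (show ¬ (n ≤ start + L + L) by omega),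
              if_pos (show start + 2 * L < n by omega)]
          have hi2 := pvInnerA_spec seq (-1) L.toNat
            (accum + (pvT seq (start + L) - pvT seq start)) (start + L + L) (by omega) hsubn
          rw [hLt] at hi2
          rw [hi2]
          dsimp only
          rw [← hstart]
          rw [pvPget seq (min (start + 2 * L + L) n) (by omega) (by omega),
              pvPget seq (start + 2 * L) (by omega) (by omega)]
          have hsub2 : pvT seq (start + 2 * L) = pvT seq (start + L + L) := by
            congr 1; ring
          rw [hsub2]
          by_cases hlast : start + L + L + L < n
          · have hm2 : min (start + L + L + L) n = start + L + L + L := by omega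
            have hm3 : min (start + 2 * L + L) n = start + L + L + L := by omega
            rw [hm2, hm3]
            have hnext : start + L + L + L + L = level + 4 * L * (k + 1) := by
              rw [hstart]; ring
            have hacc :
                accum + (pvT seq (start + L) - pvT seq start) +
                    -1 * (pvT seq (start + L + L + L) - pvT seq (start + L + L)) =
                  accum + (pvT seq (start + L) - pvT seq start) -
                    (pvT seq (start + L + L + L) - pvT seq (start + L + L)) := by ring
            rw [hacc, hnext]
            exact ih (k + 1) _ (by omega)
          · have hm2 : min (start + L + L + L) n = n := by omega
            have hm3 : min (start + 2 * L + L) n = n := by omega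
            rw [hm2, hm3]
            rw [pvLoopA_done seq level fuel _ _ (by omega)]
            rw [pvLoopB_done seq level L fuel _ (k + 1) (by
              have : level + 4 * L * (k + 1) = start + 4 * L := by rw [hstart]; ring
              omega)]
            ring
        · rw [if_pos (show n ≤ start + L + L by omega),
              if_neg (show ¬ (start + 2 * L < n) by omega)]
          rw [pvLoopB_done seq level L fuel _ (k + 1) (by
            have : level + 4 * L * (k + 1) = start + 4 * L := by rw [hstart]; ring
            omega)]
      · have hmin1 : min (start + L) n = n := by omega
        rw [hmin1]
        rw [if_pos (show n ≤ n + L by omega),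
            if_neg (show ¬ (start + 2 * L < n) by omega)]
        rw [pvLoopB_done seq level L fuel _ (k + 1) (by
          have : level + 4 * L * (k + 1) = start + 4 * L := by rw [hstart]; ring
          omega)]
    · rw [if_neg hs, if_pos (by omega)]

-- ===== VERDICT (by name: the statement is the Claim_ definition above) =====
theorem sum_nonzero_patterned_values_spec : Claim_equal_sum_nonzero_patterned_values := by
  intro level seq _ hpre
  unfold Spec_sum_nonzero_patterned_values
  unfold sum_nonzero_patterned_values sum_nonzero_patterned_values_alt
  have := pvLoop_eq seq level hpre (seq.length + 1) 0 0 le_rfl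
  simpa using this
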